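-- pv_equiv track=rewrite | github.com/seehausf/fremof-1.0 | modules/results_processor.py | _determine_technology_type
-- ===== SOURCE A (Python) =====
-- def _determine_technology_type(component_label: str) -> str:
--     """Bestimmt Technologie-Typ basierend auf Komponenten-Label."""
--     label_lower = component_label.lower()
--
--     if any(word in label_lower for word in ['pv', 'solar', 'photovoltaic']):
--         return 'PV Solar'
--     elif any(word in label_lower for word in ['wind', 'wtg']):
--         return 'Wind Power'
--     elif any(word in label_lower for word in ['grid', 'import']) and 'export' not in label_lower:
--         return 'Grid Import'
--     elif any(word in label_lower for word in ['grid', 'export']):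
--         return 'Grid Export'
--     elif any(word in label_lower for word in ['gas']) and any(word in label_lower for word in ['plant', 'power']):
--         return 'Gas Power Plant'
--     elif any(word in label_lower for word in ['gas', 'boiler']):
--         return 'Gas Boiler'
--     elif any(word in label_lower for word in ['heat', 'pump']):
--         return 'Heat Pump'
--     elif any(word in label_lower for word in ['chp', 'kwk']):
--         return 'CHP Plant'
--     elif any(word in label_lower for word in ['battery', 'storage']) and 'thermal' not in label_lower:
--         return 'Battery Storage'
--     elif any(word in label_lower for word in ['thermal', 'storage']):
--         return 'Thermal Storage'
--     elif any(word in label_lower for word in ['load', 'demand']):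
--         return 'Electrical Load'
--     elif 'bus' in label_lower:
--         return 'Energy Bus'
--     else:
--         return 'Other Technology'
-- ===== SOURCE B (Python) =====
-- # Single-scan keyword matcher: instead of running one substring search per rule
-- # keyword over the label (24 searches), sweep the lowercased label once, at each
-- # position recording every keyword that starts there; then resolve the label from
-- # the resulting found-set with set operations.
-- _KEYWORDS = ("pv", "solar", "photovoltaic", "wind", "wtg", "grid", "import",
--              "export", "gas", "plant", "power", "boiler", "heat", "pump",
--              "chp", "kwk", "battery", "storage", "thermal", "load", "demand",
--              "bus")
--
--
-- def _determine_technology_type(component_label: str) -> str: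
--     s = component_label.lower()
--     found = set()
--     for i in range(len(s)):
--         for kw in _KEYWORDS:
--             if s.startswith(kw, i):
--                 found.add(kw)
--     if found & {"pv", "solar", "photovoltaic"}:
--         return "PV Solar"
--     if found & {"wind", "wtg"}:
--         return "Wind Power"
--     if found & {"grid", "import"} and "export" not in found:
--         return "Grid Import"
--     if found & {"grid", "export"}:
--         return "Grid Export"
--     if "gas" in found and found & {"plant", "power"}:
--         return "Gas Power Plant"
--     if found & {"gas", "boiler"}:
--         return "Gas Boiler"
--     if found & {"heat", "pump"}:
--         return "Heat Pump"
--     if found & {"chp", "kwk"}: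
--         return "CHP Plant"
--     if found & {"battery", "storage"} and "thermal" not in found:
--         return "Battery Storage"
--     if found & {"thermal", "storage"}:
--         return "Thermal Storage"
--     if found & {"load", "demand"}:
--         return "Electrical Load"
--     if "bus" in found:
--         return "Energy Bus"
--     return "Other Technology"
-- ===== Notes on version B (the rewrite author's own statement) =====
-- stated objective: alternative
-- what changed: Replaced per-rule substring searches by a single left-to-right sweep of the lowercased label that records every keyword starting at each position into a found-set, from which the technology is then resolved by set operations.
import Mathlib
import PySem

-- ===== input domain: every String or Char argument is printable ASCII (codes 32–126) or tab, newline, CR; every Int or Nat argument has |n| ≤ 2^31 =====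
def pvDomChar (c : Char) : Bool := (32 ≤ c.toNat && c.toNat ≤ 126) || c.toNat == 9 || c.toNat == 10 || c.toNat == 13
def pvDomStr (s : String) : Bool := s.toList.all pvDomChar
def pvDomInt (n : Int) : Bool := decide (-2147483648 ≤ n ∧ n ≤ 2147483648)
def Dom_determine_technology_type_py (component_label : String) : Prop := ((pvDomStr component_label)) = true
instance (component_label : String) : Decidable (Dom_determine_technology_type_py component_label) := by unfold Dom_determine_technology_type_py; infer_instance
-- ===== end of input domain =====

-- B replaces A's per-rule substring searches by a single sweep of the lowercased
-- label that builds the set of occurring keywords, then resolves the technology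
-- from that set (alternative algorithm, same asymptotic cost).

-- ===== PORT A =====
-- literal transliteration of A's if/elif chain; 'word in label_lower' = PySem.Str.isIn
def determine_technology_type_py (component_label : String) : String :=
  let label_lower := PySem.Str.lower component_label
  if ["pv", "solar", "photovoltaic"].any (fun w => PySem.Str.isIn w label_lower) then "PV Solar"
  else if ["wind", "wtg"].any (fun w => PySem.Str.isIn w label_lower) then "Wind Power"
  else if (["grid", "import"].any (fun w => PySem.Str.isIn w label_lower)) && !(PySem.Str.isIn "export" label_lower) then "Grid Import"
  else if ["grid", "export"].any (fun w => PySem.Str.isIn w label_lower) then "Grid Export"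
  else if (["gas"].any (fun w => PySem.Str.isIn w label_lower)) && (["plant", "power"].any (fun w => PySem.Str.isIn w label_lower)) then "Gas Power Plant"
  else if ["gas", "boiler"].any (fun w => PySem.Str.isIn w label_lower) then "Gas Boiler"
  else if ["heat", "pump"].any (fun w => PySem.Str.isIn w label_lower) then "Heat Pump"
  else if ["chp", "kwk"].any (fun w => PySem.Str.isIn w label_lower) then "CHP Plant"
  else if (["battery", "storage"].any (fun w => PySem.Str.isIn w label_lower)) && !(PySem.Str.isIn "thermal" label_lower) then "Battery Storage"
  else if ["thermal", "storage"].any (fun w => PySem.Str.isIn w label_lower) then "Thermal Storage"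
  else if ["load", "demand"].any (fun w => PySem.Str.isIn w label_lower) then "Electrical Load"
  else if PySem.Str.isIn "bus" label_lower then "Energy Bus"
  else "Other Technology"

-- ===== PORT B =====
-- Source B's keyword tuple
def pvKeywords : List String :=
  ["pv", "solar", "photovoltaic", "wind", "wtg", "grid", "import", "export",
   "gas", "plant", "power", "boiler", "heat", "pump", "chp", "kwk", "battery",
   "storage", "thermal", "load", "demand", "bus"]

-- Source B's scan loop: for i in range(len(s)): for kw in _KEYWORDS: if s.startswith(kw, i): found.add(kw)
def pvFound (s : List Char) : PySem.Set String :=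
  (List.range s.length).foldl (fun acc i =>
    pvKeywords.foldl (fun acc kw =>
      if PySem.Chars.startswith (s.drop i) kw.toList then PySem.Set.add acc kw else acc) acc)
    PySem.Set.empty

-- truthiness of 'found & {…}' / membership 'kw in found'
def pvHit (found : PySem.Set String) (g : List String) : Bool :=
  !(PySem.Set.inter found g).isEmpty

def determine_technology_type_py_alt (component_label : String) : String :=
  let found := pvFound (PySem.Str.lower component_label).toList
  if pvHit found ["pv", "solar", "photovoltaic"] then "PV Solar"
  else if pvHit found ["wind", "wtg"] then "Wind Power"
  else if pvHit found ["grid", "import"] && !(PySem.Set.contains found "export") then "Grid Import"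
  else if pvHit found ["grid", "export"] then "Grid Export"
  else if PySem.Set.contains found "gas" && pvHit found ["plant", "power"] then "Gas Power Plant"
  else if pvHit found ["gas", "boiler"] then "Gas Boiler"
  else if pvHit found ["heat", "pump"] then "Heat Pump"
  else if pvHit found ["chp", "kwk"] then "CHP Plant"
  else if pvHit found ["battery", "storage"] && !(PySem.Set.contains found "thermal") then "Battery Storage"
  else if pvHit found ["thermal", "storage"] then "Thermal Storage"
  else if pvHit found ["load", "demand"] then "Electrical Load"
  else if PySem.Set.contains found "bus" then "Energy Bus"
  else "Other Technology"

-- ===== PRECONDITION & SPEC =====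
def Spec_determine_technology_type_py (component_label : String) (out : String) : Prop := out = determine_technology_type_py_alt component_label
instance (component_label : String) (out : String) : Decidable (Spec_determine_technology_type_py component_label out) := by unfold Spec_determine_technology_type_py; infer_instance

-- ===== CLAIM (what is proved, stated in full; the proofs are below) =====
def Claim_equal_determine_technology_type_py : Prop := ∀ (component_label : String), Dom_determine_technology_type_py component_label → Spec_determine_technology_type_py component_label (determine_technology_type_py component_label)

-- ===== LEMMAS AND PROOFS =====

-- the inner keyword loop only adds keywords satisfying the test
theorem pv_mem_foldl_add (p : String → Bool) (K acc : List String) (x : String) :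
    x ∈ K.foldl (fun a kw => if p kw then PySem.Set.add a kw else a) acc ↔
      x ∈ acc ∨ (x ∈ K ∧ p x = true) := by
  induction K generalizing acc with
  | nil => simp
  | cons k K ih =>
      simp only [List.foldl_cons, List.mem_cons]
      by_cases h : p k = true
      · rw [if_pos h, ih]
        simp only [PySem.Set.mem_add]
        constructor
        · rintro (⟨h1 | rfl⟩ | ⟨h1, h2⟩)
          · exact Or.inl h1
          · exact Or.inr ⟨Or.inl rfl, h⟩
          · exact Or.inr ⟨Or.inr h1, h2⟩
        · rintro (h1 | ⟨rfl | h1, h2⟩)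
          · exact Or.inl (Or.inl h1)
          · exact Or.inl (Or.inr rfl)
          · exact Or.inr ⟨h1, h2⟩
      · rw [if_neg h, ih]
        constructor
        · rintro (h1 | ⟨h1, h2⟩)
          · exact Or.inl h1
          · exact Or.inr ⟨Or.inr h1, h2⟩
        · rintro (h1 | ⟨rfl | h1, h2⟩)
          · exact Or.inl h1
          · exact absurd h2 h
          · exact Or.inr ⟨h1, h2⟩

-- characterisation of the full scan
theorem pv_mem_scan (s : List Char) (I : List ℕ) (acc : List String) (x : String) :
    x ∈ I.foldl (fun a i =>
        pvKeywords.foldl (fun a kw =>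
          if PySem.Chars.startswith (s.drop i) kw.toList then PySem.Set.add a kw else a) a) acc ↔
      x ∈ acc ∨ (x ∈ pvKeywords ∧ ∃ i ∈ I, PySem.Chars.startswith (s.drop i) x.toList = true) := by
  induction I generalizing acc with
  | nil => simp
  | cons i I ih =>
      simp only [List.foldl_cons]
      rw [ih, pv_mem_foldl_add]
      constructor
      · rintro ((h1 | ⟨h1, h2⟩) | ⟨h1, j, hj, h2⟩)
        · exact Or.inl h1
        · exact Or.inr ⟨h1, i, List.mem_cons_self, h2⟩
        · exact Or.inr ⟨h1, j, List.mem_cons_of_mem _ hj, h2⟩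
      · rintro (h1 | ⟨h1, j, hj, h2⟩)
        · exact Or.inl (Or.inl h1)
        · rcases List.mem_cons.mp hj with rfl | hj
          · exact Or.inl (Or.inr ⟨h1, h2⟩)
          · exact Or.inr ⟨h1, j, hj, h2⟩

-- a keyword is in the found-set iff it occurs as a substring of the label
theorem pv_found_iff (s : List Char) (kw : String) (hk : kw ∈ pvKeywords)
    (hne : kw.toList ≠ []) :
    kw ∈ pvFound s ↔ PySem.Chars.isIn kw.toList s = true := by
  unfold pvFound
  rw [pv_mem_scan]
  simp only [PySem.Set.empty, List.not_mem_nil, false_or, List.mem_range]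
  rw [← PySem.Chars.exists_prefix_drop_iff_isIn]
  constructor
  · rintro ⟨_, i, _, h⟩
    exact ⟨i, (PySem.Chars.startswith_iff _ _).mp h⟩
  · rintro ⟨j, hj⟩
    refine ⟨hk, j, ?_, (PySem.Chars.startswith_iff _ _).mpr hj⟩
    by_contra h
    rw [List.drop_eq_nil_of_le (le_of_not_gt h)] at hj
    exact hne (List.prefix_nil.mp hj)

-- 'kw in found' agrees with Python's 'kw in label'
theorem pv_contains_eq (L : String) (kw : String) (hk : kw ∈ pvKeywords)
    (hne : kw.toList ≠ []) :
    PySem.Set.contains (pvFound L.toList) kw = PySem.Str.isIn kw L := by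
  have h1 := pv_found_iff L.toList kw hk hne
  have h2 : PySem.Set.contains (pvFound L.toList) kw = true ↔ kw ∈ pvFound L.toList := by
    simp [PySem.Set.contains]
  rw [Bool.eq_iff_iff, h2, h1]
  simp [PySem.Str.isIn]

-- truthiness of 'found & {…}' agrees with A's any-of substring test
theorem pv_hit_eq (L : String) (g : List String)
    (hg : ∀ w ∈ g, w ∈ pvKeywords ∧ w.toList ≠ []) :
    pvHit (pvFound L.toList) g = g.any (fun w => PySem.Str.isIn w L) := by
  unfold pvHit
  have hne : ∀ (l : List String), (!l.isEmpty) = true ↔ l ≠ [] := by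
    intro l; cases l <;> simp
  rw [Bool.eq_iff_iff, hne, List.any_eq_true]
  constructor
  · intro h
    obtain ⟨x, hx⟩ := List.exists_mem_of_ne_nil _ h
    obtain ⟨h1, h2⟩ := (PySem.Set.mem_inter _ _ _).mp hx
    obtain ⟨hk, hkne⟩ := hg x h2
    exact ⟨x, h2, (pv_contains_eq L x hk hkne) ▸ (by simp [PySem.Set.contains]; exact h1)⟩
  · rintro ⟨w, hw, hin⟩
    obtain ⟨hk, hkne⟩ := hg w hw
    have hmem : w ∈ PySem.Set.inter (pvFound L.toList) g :=
      (PySem.Set.mem_inter _ _ _).mpr ⟨(pv_found_iff L.toList w hk hkne).mpr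
        (by simpa [PySem.Str.isIn] using hin), hw⟩
    intro hnil
    rw [hnil] at hmem
    exact List.not_mem_nil hmem

-- ===== VERDICT (by name: the statement is the Claim_ definition above) =====
theorem determine_technology_type_py_spec : Claim_equal_determine_technology_type_py := by
  intro s _
  unfold Spec_determine_technology_type_py determine_technology_type_py
    determine_technology_type_py_alt
  set L := PySem.Str.lower s with hL
  have e1 := pv_hit_eq L ["pv", "solar", "photovoltaic"] (by decide)
  have e2 := pv_hit_eq L ["wind", "wtg"] (by decide)
  have e3 := pv_hit_eq L ["grid", "import"] (by decide)
  have e4 := pv_hit_eq L ["grid", "export"] (by decide)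
  have e5 := pv_hit_eq L ["plant", "power"] (by decide)
  have e6 := pv_hit_eq L ["gas", "boiler"] (by decide)
  have e7 := pv_hit_eq L ["heat", "pump"] (by decide)
  have e8 := pv_hit_eq L ["chp", "kwk"] (by decide)
  have e9 := pv_hit_eq L ["battery", "storage"] (by decide)
  have e10 := pv_hit_eq L ["thermal", "storage"] (by decide)
  have e11 := pv_hit_eq L ["load", "demand"] (by decide)
  have c1 := pv_contains_eq L "export" (by decide) (by decide)
  have c2 := pv_contains_eq L "gas" (by decide) (by decide)
  have c3 := pv_contains_eq L "thermal" (by decide) (by decide)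
  have c4 := pv_contains_eq L "bus" (by decide) (by decide)
  simp only [e1, e2, e3, e4, e5, e6, e7, e8, e9, e10, e11, c1, c2, c3, c4,
    List.any_cons, List.any_nil, Bool.or_false]
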